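-- pv_equiv track=rewrite | github.com/MahatoOm/LeetCode | 2338-minimum-consecutive-cards-to-pick-up/2338-minimum-consecutive-cards-to-pick-up.py | minimumCardPickup
-- ===== SOURCE A (Python) =====
-- from typing import List
--
-- def minimumCardPickup(cards: List[int]) -> int:
--
--     left, right = 0,0
--     min_val = len(cards) + 1
--     dict_table = {}
--     while right < len(cards):
--         if cards[right] in dict_table:
--             idx = dict_table[cards[right]]
--             min_val = min(min_val , right-idx + 1)
--
--
--         dict_table[cards[right]] = right
--         right+=1
--
--     return min_val if min_val <= len(cards) else -1
-- ===== SOURCE B (Python) =====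
-- from typing import List
--
-- def minimumCardPickup(cards: List[int]) -> int:
--     # Phase 1: group positions by card value.
--     table = {}
--     for i, c in enumerate(cards):
--         table.setdefault(c, []).append(i)
--     # Phase 2: minimum gap between consecutive occurrences within each group.
--     best = None
--     for idxs in table.values():
--         for prev, cur in zip(idxs, idxs[1:]):
--             d = cur - prev + 1
--             if best is None or d < best:
--                 best = d
--     return best if best is not None else -1
-- ===== Notes on version B (the rewrite author's own statement) =====
-- stated objective: alternative
-- what changed: Replaced A's single streaming last-seen-index pass with a two-phase algorithm: first build a dictionary mapping each value to the list of all its positions, then scan each group's consecutive position pairs for the minimum gap, returning -1 when no duplicate exists.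
import Mathlib
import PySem

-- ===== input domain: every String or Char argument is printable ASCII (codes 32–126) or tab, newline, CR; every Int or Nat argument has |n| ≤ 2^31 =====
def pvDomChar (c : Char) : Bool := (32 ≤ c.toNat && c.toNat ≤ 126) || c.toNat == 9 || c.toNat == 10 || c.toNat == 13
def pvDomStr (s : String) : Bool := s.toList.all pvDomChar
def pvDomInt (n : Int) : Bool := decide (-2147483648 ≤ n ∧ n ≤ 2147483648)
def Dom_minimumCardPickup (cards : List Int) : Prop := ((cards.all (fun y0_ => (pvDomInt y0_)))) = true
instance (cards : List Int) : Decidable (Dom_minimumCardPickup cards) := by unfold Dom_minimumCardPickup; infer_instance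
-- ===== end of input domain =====

-- B replaces A's single streaming last-seen-index pass by a two-phase algorithm (group
-- all positions by value, then scan each group's consecutive gaps); same O(n) cost.

-- ===== PORT A =====
-- A: one pass with a dict of last-seen indices, tracking min_val with sentinel len+1.
def minimumCardPickup (cards : List Int) : Int :=
  let n : Int := cards.length
  let res := (PySem.List.enumerate cards).foldl
    (fun (st : Int × PySem.Dict Int Int) p =>
      (if st.2.contains p.2 then min st.1 (p.1 - st.2.getD p.2 0 + 1) else st.1,
       st.2.insert p.2 p.1))
    (n + 1, PySem.Dict.empty)
  if res.1 ≤ n then res.1 else -1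

-- ===== PORT B =====
-- inner loop of B: 'for prev, cur in zip(idxs, idxs[1:]): …' updating the running best
def pvAdjScan (b : Option Int) (idxs : List Int) : Option Int :=
  (idxs.zip idxs.tail).foldl
    (fun b pr =>
      let d := pr.2 - pr.1 + 1
      some (match b with | none => d | some v => if d < v then d else v)) b

def minimumCardPickup_alt (cards : List Int) : Int :=
  -- phase 1: table.setdefault(c, []).append(i)
  let table := (PySem.List.enumerate cards).foldl
      (fun (d : PySem.Dict Int (List Int)) p => d.modify p.2 [] (· ++ [p.1]))
      PySem.Dict.empty
  -- phase 2: scan every group's consecutive pairs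
  let best := table.items.foldl (fun b pr => pvAdjScan b pr.2) (none : Option Int)
  match best with | some v => v | none => -1

-- ===== PRECONDITION & SPEC =====
def Spec_minimumCardPickup (cards : List Int) (out : Int) : Prop := out = minimumCardPickup_alt cards
instance (cards : List Int) (out : Int) : Decidable (Spec_minimumCardPickup cards out) := by unfold Spec_minimumCardPickup; infer_instance

-- ===== CLAIM (what is proved, stated in full; the proofs are below) =====
def Claim_equal_minimumCardPickup : Prop := ∀ (cards : List Int), Dom_minimumCardPickup cards → Spec_minimumCardPickup cards (minimumCardPickup cards)

-- ===== LEMMAS AND PROOFS =====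

-- value/index pairs, A's loop in (value, index) form
def pvPairs (cards : List Int) : List (Int × Int) :=
  (PySem.List.enumerate cards).map (fun p => (p.2, p.1))

def pvStepA (st : Int × PySem.Dict Int Int) (q : Int × Int) : Int × PySem.Dict Int Int :=
  (if st.2.contains q.1 then min st.1 (q.2 - st.2.getD q.1 0 + 1) else st.1,
   st.2.insert q.1 q.2)

-- the stream of gaps A's loop feeds into min, starting from last-seen table d
def pvGapsFrom (d : PySem.Dict Int Int) : List (Int × Int) → List Int
  | [] => []
  | q :: t =>
    (if d.contains q.1 then [q.2 - d.getD q.1 0 + 1] else []) ++ pvGapsFrom (d.insert q.1 q.2) t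

-- consecutive gaps of a position list
def pvAdjG (xs : List Int) : List Int :=
  (xs.zip xs.tail).map (fun pr => pr.2 - pr.1 + 1)

def pvOCons (o : Option Int) (xs : List Int) : List Int :=
  match o with | some p => p :: xs | none => xs

-- positions of value v in the pair list
def pvPosIn (l : List (Int × Int)) (v : Int) : List Int :=
  (l.filter (fun p => p.1 == v)).map (·.2)

def pvOptStep (b : Option Int) (d : Int) : Option Int :=
  some (match b with | none => d | some v => if d < v then d else v)

lemma pvFoldA_fst (l : List (Int × Int)) :
    ∀ (m : Int) (d : PySem.Dict Int Int),
      (l.foldl pvStepA (m, d)).1 = (pvGapsFrom d l).foldl min m := by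
  induction l with
  | nil => intro m d; simp [pvGapsFrom]
  | cons q t ih =>
    intro m d
    simp only [List.foldl_cons, pvGapsFrom, List.foldl_append]
    by_cases h : d.contains q.1 = true
    · simp [pvStepA, h, ih]
    · simp at h
      simp [pvStepA, h, ih]

lemma pvPosIn_cons (c i : Int) (t : List (Int × Int)) (v : Int) :
    pvPosIn ((c, i) :: t) v = if c = v then i :: pvPosIn t v else pvPosIn t v := by
  by_cases h : c = v <;> simp [pvPosIn, h]

lemma pvPosIn_nil_of_not_mem (t : List (Int × Int)) (c : Int) (h : c ∉ t.map (·.1)) :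
    pvPosIn t c = [] := by
  simp only [pvPosIn, List.map_eq_nil_iff, List.filter_eq_nil_iff]
  intro p hp
  simp only [beq_iff_eq]
  intro hc
  exact h (List.mem_map.mpr ⟨p, hp, hc⟩)

lemma pvAdjG_cons_cons (p i : Int) (xs : List Int) :
    pvAdjG (p :: i :: xs) = (i - p + 1) :: pvAdjG (i :: xs) := by
  simp [pvAdjG]

-- flatMap where F and F' differ only at c (once in xs): move the extra block g0 to the front
lemma pvFlatMap_shift (g0 : List Int) (F F' : Int → List Int) (c : Int)
    (hc : F c = g0 ++ F' c) (hne : ∀ v, v ≠ c → F v = F' v) :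
    ∀ xs : List Int, xs.Nodup → c ∈ xs →
      List.Perm (xs.flatMap F) (g0 ++ xs.flatMap F') := by
  intro xs
  induction xs with
  | nil => intro _ h; cases h
  | cons a rest ih =>
    intro hnd hmem
    rcases List.nodup_cons.mp hnd with ⟨hna, hndr⟩
    by_cases hac : a = c
    · subst hac
      have hrest : rest.flatMap F = rest.flatMap F' := by
        apply List.flatMap_congr
        intro v hv
        exact hne v (fun h => hna (h ▸ hv))
      rw [List.flatMap_cons, List.flatMap_cons, hc, hrest, List.append_assoc]
    · have hcr : c ∈ rest := by
        cases hmem with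
        | head => exact absurd rfl hac
        | tail _ h => exact h
      have ha : F a = F' a := hne a hac
      have h1 : List.Perm (F' a ++ rest.flatMap F) (F' a ++ (g0 ++ rest.flatMap F')) :=
        (ih hndr hcr).append_left _
      have h2 : List.Perm (F' a ++ (g0 ++ rest.flatMap F')) (g0 ++ (F' a ++ rest.flatMap F')) :=
        List.perm_append_comm_assoc _ _ _
      rw [List.flatMap_cons, ha, List.flatMap_cons]
      exact h1.trans h2

lemma pvFlatMap_congr_off (F F' : Int → List Int) (c : Int)
    (hne : ∀ v, v ≠ c → F v = F' v) (xs : List Int) (h : c ∉ xs) :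
    xs.flatMap F = xs.flatMap F' := by
  apply List.flatMap_congr
  intro v hv
  exact hne v (fun hvc => h (hvc ▸ hv))

-- A's gap stream is, up to permutation, the per-value consecutive gaps
lemma pvGapsFrom_perm (l : List (Int × Int)) :
    ∀ d : PySem.Dict Int Int,
      List.Perm (pvGapsFrom d l)
        ((PySem.Set.ofList (l.map (·.1))).flatMap
          (fun v => pvAdjG (pvOCons (d.get? v) (pvPosIn l v)))) := by
  induction l with
  | nil => intro d; simp [pvGapsFrom, PySem.Set.ofList_nil]
  | cons q t ih =>
    intro d
    obtain ⟨c, i⟩ := q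
    set F : Int → List Int :=
      fun v => pvAdjG (pvOCons (d.get? v) (pvPosIn ((c, i) :: t) v)) with hF
    set F' : Int → List Int :=
      fun v => pvAdjG (pvOCons ((d.insert c i).get? v) (pvPosIn t v)) with hF'
    set g0 : List Int := if d.contains c then [i - d.getD c 0 + 1] else [] with hg0
    have hne : ∀ v, v ≠ c → F v = F' v := by
      intro v hv
      simp only [hF, hF', pvPosIn_cons, PySem.Dict.get?_insert_of_ne d i hv,
        if_neg (fun h : c = v => hv h.symm)]
    have hFc : F c = g0 ++ F' c := by
      simp only [hF, hF', pvPosIn_cons, PySem.Dict.get?_insert_self]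
      cases hgc : d.get? c with
      | none =>
        have : d.contains c = false := by
          rw [PySem.Dict.contains_eq_isSome_get?, hgc]; rfl
        simp [pvOCons, hg0, this]
      | some p =>
        have hcon : d.contains c = true := by
          rw [PySem.Dict.contains_eq_isSome_get?, hgc]; rfl
        have hgd : d.getD c 0 = p := PySem.Dict.getD_of_get?_eq_some d 0 hgc
        simp [pvOCons, hg0, hcon, hgd, pvAdjG_cons_cons]
    have hstep : pvGapsFrom d ((c, i) :: t) = g0 ++ pvGapsFrom (d.insert c i) t := by
      simp [pvGapsFrom, hg0]
    have hIH := ih (d.insert c i)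
    -- RHS set analysis
    by_cases hmem : c ∈ t.map (·.1)
    · -- c occurs later: the two dedup lists are permutations of each other
      have hpermS : List.Perm (PySem.Set.ofList (((c, i) :: t).map (·.1)))
          (PySem.Set.ofList (t.map (·.1))) := by
        rw [List.perm_ext_iff_of_nodup (PySem.Set.nodup_ofList _) (PySem.Set.nodup_ofList _)]
        intro v
        simp only [PySem.Set.mem_ofList, List.map_cons, List.mem_cons]
        constructor
        · rintro (rfl | h); exacts [hmem, h]
        · exact Or.inr
      have h1 : List.Perm ((PySem.Set.ofList (((c, i) :: t).map (·.1))).flatMap F)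
          ((PySem.Set.ofList (t.map (·.1))).flatMap F) := hpermS.flatMap_right F
      have h2 := pvFlatMap_shift g0 F F' c hFc hne
        (PySem.Set.ofList (t.map (·.1))) (PySem.Set.nodup_ofList _)
        ((PySem.Set.mem_ofList _ _).mpr hmem)
      rw [hstep]
      exact (hIH.append_left g0).trans (h1.trans h2).symm
    · -- c is fresh in t
      have hcS : c ∉ PySem.Set.ofList (t.map (·.1)) :=
        fun h => hmem ((PySem.Set.mem_ofList _ _).mp h)
      have hpermS : List.Perm (PySem.Set.ofList (((c, i) :: t).map (·.1)))
          (c :: PySem.Set.ofList (t.map (·.1))) := by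
        rw [List.perm_ext_iff_of_nodup (PySem.Set.nodup_ofList _)
          (List.nodup_cons.mpr ⟨hcS, PySem.Set.nodup_ofList _⟩)]
        intro v
        simp [PySem.Set.mem_ofList]
      have hF'c : F' c = [] := by
        simp [hF', PySem.Dict.get?_insert_self, pvOCons,
          pvPosIn_nil_of_not_mem t c hmem, pvAdjG]
      have hcongr : (PySem.Set.ofList (t.map (·.1))).flatMap F
          = (PySem.Set.ofList (t.map (·.1))).flatMap F' :=
        pvFlatMap_congr_off F F' c hne _ hcS
      have h1 : List.Perm ((PySem.Set.ofList (((c, i) :: t).map (·.1))).flatMap F)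
          (g0 ++ (PySem.Set.ofList (t.map (·.1))).flatMap F') := by
        have := hpermS.flatMap_right F
        simp only [List.flatMap_cons, hFc, hF'c, List.append_nil, hcongr] at this
        exact this
      rw [hstep]
      exact (hIH.append_left g0).trans h1.symm

-- == foldl min facts ==
lemma pvFoldlMin_le_init (l : List Int) : ∀ a : Int, l.foldl min a ≤ a := by
  induction l with
  | nil => intro a; simp
  | cons x t ih => intro a; exact le_trans (ih (min a x)) (min_le_left a x)

lemma pvFoldlMin_min (l : List Int) : ∀ a b : Int, l.foldl min (min a b) = min a (l.foldl min b) := by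
  induction l with
  | nil => intro a b; simp
  | cons x t ih =>
    intro a b
    simp only [List.foldl_cons]
    rw [min_assoc, ih]

lemma pvFoldlMin_perm {l l' : List Int} (h : List.Perm l l') (a : Int) :
    l.foldl min a = l'.foldl min a := by
  refine h.foldl_eq' ?_ a
  intro x _ y _ z
  rw [min_assoc, min_comm x y, ← min_assoc]

-- ==  the Option-min scan ==
lemma pvOptStep_some (l : List Int) : ∀ b : Int, l.foldl pvOptStep (some b) = some (l.foldl min b) := by
  induction l with
  | nil => intro b; rfl
  | cons x t ih =>
    intro b
    have : pvOptStep (some b) x = some (min b x) := by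
      simp only [pvOptStep]
      congr 1
      by_cases h : x < b
      · simp [h, le_of_lt h]
      · simp [h, le_of_not_gt h]
    simp only [List.foldl_cons, this, ih]

lemma pvFoldl_scan_flatMap (items : List (Int × List Int)) :
    ∀ b : Option Int,
      items.foldl (fun b pr => pvAdjScan b pr.2) b
        = (items.flatMap (fun pr => pvAdjG pr.2)).foldl pvOptStep b := by
  induction items with
  | nil => intro b; rfl
  | cons p t ih =>
    intro b
    have hscan : pvAdjScan b p.2 = (pvAdjG p.2).foldl pvOptStep b := by
      simp only [pvAdjScan, pvAdjG, List.foldl_map]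
      rfl
    simp only [List.foldl_cons, List.flatMap_cons, List.foldl_append, hscan, ih]

-- every gap in the canonical stream is at most the length of cards
lemma pvGap_le (cards : List Int) (g : Int)
    (hg : g ∈ (PySem.Set.ofList ((pvPairs cards).map (·.1))).flatMap
      (fun v => pvAdjG (pvPosIn (pvPairs cards) v))) :
    g ≤ (cards.length : Int) := by
  rcases List.mem_flatMap.mp hg with ⟨v, _, hgv⟩
  rcases List.mem_map.mp hgv with ⟨pr, hpr, rfl⟩
  have hzip := List.of_mem_zip hpr
  have hmem : ∀ x ∈ pvPosIn (pvPairs cards) v, 0 ≤ x ∧ x ≤ (cards.length : Int) - 1 := by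
    intro x hx
    rcases List.mem_map.mp hx with ⟨p, hp, rfl⟩
    have hp' := List.mem_of_mem_filter hp
    rcases List.mem_map.mp hp' with ⟨e, he, rfl⟩
    rcases (PySem.List.mem_enumerate_iff cards 0 e).mp he with ⟨k, hk, rfl⟩
    simp only [zero_add]
    omega
  have h1 := hmem pr.1 hzip.1
  have h2 := hmem pr.2 (List.mem_of_mem_tail hzip.2)
  omega

def pvStepB (d : PySem.Dict Int (List Int)) (q : Int × Int) : PySem.Dict Int (List Int) :=
  d.modify q.1 [] (· ++ [q.2])

lemma pvTable_eq (cards : List Int) :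
    (PySem.List.enumerate cards).foldl
        (fun (d : PySem.Dict Int (List Int)) p => d.modify p.2 [] (· ++ [p.1]))
        PySem.Dict.empty
      = (pvPairs cards).foldl pvStepB PySem.Dict.empty := by
  rw [pvPairs, List.foldl_map]
  rfl

lemma pvTable_keys (cards : List Int) :
    ((pvPairs cards).foldl pvStepB PySem.Dict.empty).keys
      = PySem.Set.ofList ((pvPairs cards).map (·.1)) := by
  have h := PySem.Dict.keys_foldl_modify_key (pvPairs cards) (fun q : Int × Int => q.1)
    ([] : List Int) (fun _ q xs => xs ++ [q.2]) PySem.Dict.empty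
  calc ((pvPairs cards).foldl pvStepB PySem.Dict.empty).keys
      = PySem.Set.update PySem.Dict.empty.keys ((pvPairs cards).map (fun q => q.1)) := h
    _ = PySem.Set.ofList ((pvPairs cards).map (·.1)) := by
        rw [PySem.Dict.keys_empty, PySem.Set.update_nil_left]

lemma pvTable_nodup (cards : List Int) :
    ((pvPairs cards).foldl pvStepB PySem.Dict.empty).keys.Nodup := by
  have h := PySem.Dict.nodup_keys_foldl_modify_key (pvPairs cards) (fun q : Int × Int => q.1)
    ([] : List Int) (fun _ q xs => xs ++ [q.2]) PySem.Dict.empty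
    (by rw [PySem.Dict.keys_empty]; exact List.nodup_nil)
  exact h

lemma pvTable_getD (cards : List Int) (c : Int) :
    ((pvPairs cards).foldl pvStepB PySem.Dict.empty).getD c []
      = pvPosIn (pvPairs cards) c := by
  have h := PySem.Dict.getD_foldl_modify_append (pvPairs cards) PySem.Dict.empty c
  calc ((pvPairs cards).foldl pvStepB PySem.Dict.empty).getD c []
      = PySem.Dict.empty.getD c []
          ++ List.map (fun x => x.2) (List.filter (fun p => p.1 == c) (pvPairs cards)) := h
    _ = pvPosIn (pvPairs cards) c := by
        rw [PySem.Dict.getD_empty]; rfl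

lemma pvMain (cards : List Int) :
    minimumCardPickup cards = minimumCardPickup_alt cards := by
  have hn0 : (0 : Int) ≤ (cards.length : Int) := Int.natCast_nonneg _
  -- names
  set n : Int := (cards.length : Int) with hn
  set G : List Int := (PySem.Set.ofList ((pvPairs cards).map (·.1))).flatMap
      (fun v => pvAdjG (pvPosIn (pvPairs cards) v)) with hG
  -- A's fold, rewritten over the (value, index) pair list
  have hAfold : (PySem.List.enumerate cards).foldl
      (fun (st : Int × PySem.Dict Int Int) p =>
        (if st.2.contains p.2 then min st.1 (p.1 - st.2.getD p.2 0 + 1) else st.1,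
         st.2.insert p.2 p.1)) (n + 1, PySem.Dict.empty)
      = (pvPairs cards).foldl pvStepA (n + 1, PySem.Dict.empty) := by
    rw [pvPairs, List.foldl_map]
    rfl
  have hperm : List.Perm (pvGapsFrom PySem.Dict.empty (pvPairs cards)) G := by
    have h := pvGapsFrom_perm (pvPairs cards) PySem.Dict.empty
    rw [hG]
    have hfun : (fun v => pvAdjG (pvOCons (PySem.Dict.empty.get? v) (pvPosIn (pvPairs cards) v)))
        = (fun v => pvAdjG (pvPosIn (pvPairs cards) v)) := by
      funext v
      rw [PySem.Dict.get?_empty]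
      rfl
    rw [hfun] at h
    exact h
  have hA : minimumCardPickup cards
      = (if G.foldl min (n + 1) ≤ n then G.foldl min (n + 1) else -1) := by
    show (if ((PySem.List.enumerate cards).foldl _ (n + 1, PySem.Dict.empty)).1 ≤ n
        then ((PySem.List.enumerate cards).foldl _ (n + 1, PySem.Dict.empty)).1 else -1) = _
    rw [hAfold, pvFoldA_fst, pvFoldlMin_perm hperm]
  -- B side
  have hitems : ((pvPairs cards).foldl pvStepB PySem.Dict.empty).items
      = (PySem.Set.ofList ((pvPairs cards).map (·.1))).map
          (fun k => (k, pvPosIn (pvPairs cards) k)) := by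
    rw [PySem.Dict.items_eq_map_keys _ (pvTable_nodup cards) [], pvTable_keys]
    apply List.map_congr_left
    intro k _
    rw [pvTable_getD]
  have hB : minimumCardPickup_alt cards
      = (match G.foldl pvOptStep none with | some v => v | none => -1) := by
    show (match ((PySem.List.enumerate cards).foldl
        (fun (d : PySem.Dict Int (List Int)) p => d.modify p.2 [] (· ++ [p.1]))
        PySem.Dict.empty).items.foldl (fun b pr => pvAdjScan b pr.2) (none : Option Int) with
        | some v => v | none => -1) = _
    rw [pvTable_eq, hitems, pvFoldl_scan_flatMap, List.flatMap_map]
  rw [hA, hB]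
  -- compare the two reductions of the common gap stream G
  cases hGc : G with
  | nil =>
    simp only [List.foldl_nil]
    rw [if_neg (by omega)]
  | cons g t =>
    have hgG : g ∈ G := by rw [hGc]; exact List.mem_cons_self
    have hgle : g ≤ n := pvGap_le cards g (hG ▸ hgG)
    have hmle : t.foldl min g ≤ g := pvFoldlMin_le_init t g
    have hBval : (g :: t).foldl min (n + 1) = min (n + 1) (t.foldl min g) := by
      rw [List.foldl_cons, ← pvFoldlMin_min]
    have hminval : min (n + 1) (t.foldl min g) = t.foldl min g :=
      min_eq_right (by omega)
    have hOpt : (g :: t).foldl pvOptStep none = some (t.foldl min g) := by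
      rw [List.foldl_cons]
      have : pvOptStep none g = some g := rfl
      rw [this, pvOptStep_some]
    rw [hBval, hminval, hOpt, if_pos (by omega)]

-- ===== VERDICT (by name: the statement is the Claim_ definition above) =====
theorem minimumCardPickup_spec : Claim_equal_minimumCardPickup := by
  intro cards _
  exact pvMain cards
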